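-- pv_equiv track=rewrite | github.com/jalaniz1/PythonPractice | practice.py | array123
-- ===== SOURCE A (Python) =====
-- def array123(nums):
--     "Given an array of ints,return True if .. 1, 2, 3, .. appears in the array somewhere.  "
--
--     if nums is None or len(nums) == 0:
--         return False
--     hlst = {1: 1, 2: 2, 3: 3}
--
--     for n in nums:
--
--         if n in hlst:
--             del hlst[n]
--         if len(hlst) == 0:  # We've found them all!
--             return True
--     return False
-- ===== SOURCE B (Python) =====
-- def array123(nums):
--     "Given an array of ints,return True if .. 1, 2, 3, .. appears in the array somewhere.  "
--     if nums is None: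
--         return False
--     return all(t in nums for t in (1, 2, 3))
-- ===== Notes on version B (the rewrite author's own statement) =====
-- stated objective: simpler
-- what changed: Instead of scanning nums once while deleting matched keys from a mutable dict with an early-exit size test, B loops over the three fixed targets 1,2,3 and tests each for membership in nums with short-circuiting all(); no mutable accumulator or dict.
import Mathlib
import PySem

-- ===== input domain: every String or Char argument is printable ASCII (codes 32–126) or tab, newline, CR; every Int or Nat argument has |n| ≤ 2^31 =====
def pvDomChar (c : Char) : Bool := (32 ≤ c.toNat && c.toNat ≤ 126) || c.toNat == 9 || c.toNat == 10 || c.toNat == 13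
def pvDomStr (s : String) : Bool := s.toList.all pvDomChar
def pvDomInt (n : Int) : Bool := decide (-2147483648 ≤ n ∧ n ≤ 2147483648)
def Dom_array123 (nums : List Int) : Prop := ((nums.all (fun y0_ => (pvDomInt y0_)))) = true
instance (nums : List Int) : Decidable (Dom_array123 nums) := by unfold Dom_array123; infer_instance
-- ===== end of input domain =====

-- B is simpler: it loops over the three fixed targets and tests membership in nums,
-- instead of A's scan of nums deleting matched keys from a mutable dict with an early size-0 exit.

-- ===== PORT A =====
-- the `for n in nums:` loop of A; early `return True` when the dict becomes empty
def array123Loop : List Int → PySem.Dict Int Int → Bool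
  | [], _ => false
  | n :: rest, h =>
    let h1 := if h.contains n then h.erase n else h
    if h1.size = 0 then true else array123Loop rest h1

def array123 (nums : List Int) : Bool :=
  if nums.length = 0 then false
  else array123Loop nums (PySem.Dict.ofList [(1, 1), (2, 2), (3, 3)])

-- ===== PORT B =====
def array123_alt (nums : List Int) : Bool :=
  [(1 : Int), 2, 3].all (fun t => nums.contains t)

-- ===== PRECONDITION & SPEC =====
def Spec_array123 (nums : List Int) (out : Bool) : Prop := out = array123_alt nums
instance (nums : List Int) (out : Bool) : Decidable (Spec_array123 nums out) := by unfold Spec_array123; infer_instance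

-- ===== CLAIM (what is proved, stated in full; the proofs are below) =====
def Claim_equal_array123 : Prop := ∀ (nums : List Int), Dom_array123 nums → Spec_array123 nums (array123 nums)

-- ===== LEMMAS AND PROOFS =====

-- keys of the dict after one loop step: the old keys minus n
theorem mem_keys_step (h : PySem.Dict Int Int) (n k : Int) :
    k ∈ (if h.contains n then h.erase n else h).keys ↔ k ∈ h.keys ∧ k ≠ n := by
  by_cases hc : h.contains n = true
  · rw [if_pos hc]
    simp [PySem.Dict.erase, PySem.Dict.keys, List.mem_map, List.mem_filter]
  · rw [if_neg hc]
    simp only [PySem.Dict.contains, List.any_eq_true, beq_iff_eq] at hc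
    push Not at hc
    constructor
    · intro hk
      refine ⟨hk, ?_⟩
      rintro rfl
      obtain ⟨p, hp, hfst⟩ := List.mem_map.mp hk
      exact hc p hp hfst
    · exact fun hk => hk.1

theorem size_zero_iff_keys_nil (h : PySem.Dict Int Int) : h.size = 0 ↔ h.keys = [] := by
  simp [PySem.Dict.size, PySem.Dict.keys, List.length_eq_zero_iff, List.map_eq_nil_iff]

-- loop invariant: the loop returns true iff the list is nonempty and every remaining key occurs in it
theorem array123Loop_spec (l : List Int) : ∀ (h : PySem.Dict Int Int),
    array123Loop l h = true ↔ l ≠ [] ∧ ∀ k ∈ h.keys, k ∈ l := by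
  induction l with
  | nil => intro h; simp [array123Loop]
  | cons n rest ih =>
    intro h
    simp only [array123Loop]
    set h1 := if h.contains n then h.erase n else h with hh1
    have hmem : ∀ k, k ∈ h1.keys ↔ k ∈ h.keys ∧ k ≠ n := fun k => mem_keys_step h n k
    by_cases hz : h1.size = 0
    · have hke : h1.keys = [] := (size_zero_iff_keys_nil h1).1 hz
      simp only [hz, if_pos, true_iff]
      refine ⟨by simp, fun k hk => ?_⟩
      by_cases hkn : k = n
      · simp [hkn]
      · exact absurd ((hmem k).2 ⟨hk, hkn⟩) (by simp [hke])
    · simp only [hz, if_neg, ite_false, ih h1]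
      constructor
      · rintro ⟨hr, hall⟩
        refine ⟨by simp, fun k hk => ?_⟩
        by_cases hkn : k = n
        · simp [hkn]
        · exact List.mem_cons_of_mem _ (hall k ((hmem k).2 ⟨hk, hkn⟩))
      · rintro ⟨-, hall⟩
        have hne : h1.keys ≠ [] := by
          intro he
          exact hz ((size_zero_iff_keys_nil h1).2 (by
            simpa [PySem.Dict.size, PySem.Dict.keys, List.length_eq_zero_iff,
              List.map_eq_nil_iff] using congrArg List.length he))
        obtain ⟨k0, hk0⟩ := List.exists_mem_of_ne_nil _ hne
        have hrest : ∀ k ∈ h1.keys, k ∈ rest := by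
          intro k hk
          have := (hmem k).1 hk
          rcases List.mem_cons.mp (hall k this.1) with h' | h'
          · exact absurd h' this.2
          · exact h'
        exact ⟨List.ne_nil_of_mem (hrest k0 hk0), hrest⟩

-- ===== VERDICT (by name: the statement is the Claim_ definition above) =====
theorem array123_spec : Claim_equal_array123 := by
  intro nums _
  unfold Spec_array123 array123 array123_alt
  by_cases hn : nums.length = 0
  · have : nums = [] := List.length_eq_zero_iff.mp hn
    subst this
    simp
  · simp only [hn, ite_false]
    have hne : nums ≠ [] := fun he => hn (by simp [he])
    have hkeys : (PySem.Dict.ofList [((1:Int), (1:Int)), (2, 2), (3, 3)]).keys = [1, 2, 3] := by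
      decide
    cases hb : array123Loop nums (PySem.Dict.ofList [(1, 1), (2, 2), (3, 3)])
    · symm
      rw [List.all_eq_false]
      have hnot := (array123Loop_spec nums (PySem.Dict.ofList [(1, 1), (2, 2), (3, 3)])).not.1
        (by simp [hb])
      push Not at hnot
      obtain ⟨k, hk, hkn⟩ := hnot hne
      rw [hkeys] at hk
      exact ⟨k, hk, by simpa using hkn⟩
    · symm
      rw [List.all_eq_true]
      have hall := ((array123Loop_spec nums (PySem.Dict.ofList [(1, 1), (2, 2), (3, 3)])).1 hb).2
      rw [hkeys] at hall
      intro t ht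
      simpa using hall t ht
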